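-- pv_equiv track=rewrite | github.com/chestnutforestlabo/LaTeX_Reference_Formatter | process_bib.py | sort_entries
-- ===== SOURCE A (Python) =====
-- from collections import defaultdict
--
-- def sort_entries(entries):
--     grouped_entries = defaultdict(list)
--     for entry in entries:
--         entry_type = entry.get('ENTRYTYPE', 'misc').lower()
--         grouped_entries[entry_type].append(entry)
--     # Define the desired type order
--     type_order = ['inproceedings', 'article', 'proceedings', 'book', 'misc']
--     remaining_types = sorted(set(grouped_entries.keys()) - set(type_order))
--     full_type_order = type_order + remaining_types
--     sorted_entries = []
--     for entry_type in full_type_order: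
--         entries_of_type = grouped_entries.get(entry_type, [])
--         entries_of_type.sort(key=lambda e: e.get('title', '').lower())
--         sorted_entries.extend(entries_of_type)
--     return sorted_entries
-- ===== SOURCE B (Python) =====
-- def sort_entries(entries):
--     type_order = ['inproceedings', 'article', 'proceedings', 'book', 'misc']
--
--     def key(entry):
--         t = entry.get('ENTRYTYPE', 'misc').lower()
--         if t in type_order:
--             prio, tname = type_order.index(t), ''
--         else:
--             prio, tname = len(type_order), t
--         return (prio, tname, entry.get('title', '').lower())
--
--     return sorted(entries, key=key)
-- ===== Notes on version B (the rewrite author's own statement) =====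
-- stated objective: simpler
-- what changed: Replaces the group-by-type / sort-each-bucket / concatenate pipeline with a single stable sort of all entries under one composite key (type rank, type name, lowercased title).
import Mathlib
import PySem

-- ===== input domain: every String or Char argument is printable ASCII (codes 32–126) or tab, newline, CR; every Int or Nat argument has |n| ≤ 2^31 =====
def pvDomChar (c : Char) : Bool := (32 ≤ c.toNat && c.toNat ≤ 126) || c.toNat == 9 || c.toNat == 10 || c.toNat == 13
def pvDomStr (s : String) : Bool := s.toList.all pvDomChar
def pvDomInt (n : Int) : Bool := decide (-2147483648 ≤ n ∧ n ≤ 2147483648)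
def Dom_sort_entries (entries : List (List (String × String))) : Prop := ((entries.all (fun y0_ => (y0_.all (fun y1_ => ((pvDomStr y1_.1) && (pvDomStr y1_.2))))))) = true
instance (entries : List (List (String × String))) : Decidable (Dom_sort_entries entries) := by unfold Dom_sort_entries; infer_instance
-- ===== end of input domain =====

-- B is the same task as one stable sort under a composite key instead of group-then-sort-buckets; objective: simpler.

-- ===== PORT A =====
-- shared helper: Python's entry.get(k, d) on a dict[str,str] modelled as an assoc list (first match); exact by the dict convention
def pvGetD (e : List (String × String)) (k d : String) : String :=
  match e.find? (fun p => p.1 == k) with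
  | some p => p.2
  | none => d

-- entry.get('ENTRYTYPE', 'misc').lower()
def pvTypeOf (e : List (String × String)) : String := PySem.Str.lower (pvGetD e "ENTRYTYPE" "misc")
-- e.get('title', '').lower()
def pvTitleOf (e : List (String × String)) : String := PySem.Str.lower (pvGetD e "title" "")

def pvTypeOrder : List String := ["inproceedings", "article", "proceedings", "book", "misc"]

def sort_entries (entries : List (List (String × String))) : List (List (String × String)) :=
  let grouped : PySem.Dict String (List (List (String × String))) :=
    entries.foldl (fun d e => d.modify (pvTypeOf e) [] (fun l => l ++ [e])) PySem.Dict.empty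
  let remaining : List String :=
    PySem.List.sorted (PySem.Set.diff (PySem.Set.ofList grouped.keys) pvTypeOrder) (fun x => x) false
  let full : List String := pvTypeOrder ++ remaining
  full.foldl (fun acc t => acc ++ PySem.List.sorted (grouped.getD t []) (fun e => pvTitleOf e) false) []

-- ===== PORT B =====
-- composite key (prio, tname, title): ((type_order.index(t), '') if t in type_order else (5, t)), title.lower();
-- ported with PySem.List.sorted2, the tuple-key form of sorted, pairing the first two components lexicographically
def pvK1 (e : List (String × String)) : Lex (Int × String) :=
  let t := pvTypeOf e
  match PySem.List.index? pvTypeOrder t with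
  | some i => toLex ((i : Int), "")
  | none => toLex ((5 : Int), t)

def sort_entries_alt (entries : List (List (String × String))) : List (List (String × String)) :=
  PySem.List.sorted2 entries pvK1 (fun e => pvTitleOf e) false

-- ===== PRECONDITION & SPEC =====
def Spec_sort_entries (entries : List (List (String × String))) (out : List (List (String × String))) : Prop := out = sort_entries_alt entries
instance (entries : List (List (String × String))) (out : List (List (String × String))) : Decidable (Spec_sort_entries entries out) := by unfold Spec_sort_entries; infer_instance

-- ===== CLAIM (what is proved, stated in full; the proofs are below) =====
def Claim_equal_sort_entries : Prop := ∀ (entries : List (List (String × String))), Dom_sort_entries entries → Spec_sort_entries entries (sort_entries entries)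

-- ===== LEMMAS AND PROOFS =====

-- the full three-component key, as a nested lexicographic pair (proof-side only)
def pvKey (e : List (String × String)) : Lex (Lex (Int × String) × String) :=
  toLex (pvK1 e, pvTitleOf e)

-- sorted2's pairwise comparison IS the lexicographic order on the key pair
theorem pv_sorted2_eq_sorted_toLex {α κ₁ κ₂ : Type} [LinearOrder κ₁] [LinearOrder κ₂]
    (xs : List α) (k1 : α → κ₁) (k2 : α → κ₂) :
    PySem.List.sorted2 xs k1 k2 false = PySem.List.sorted xs (fun a => toLex (k1 a, k2 a)) false := by
  unfold PySem.List.sorted2 PySem.List.sorted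
  simp only [if_neg (by decide : ¬ (false = true))]
  have hb : (fun a b => decide (k1 a < k1 b) || (!decide (k1 b < k1 a) && decide (k2 a < k2 b)))
      = fun a b => decide (toLex (k1 a, k2 a) < toLex (k1 b, k2 b)) := by
    funext a b
    rcases lt_trichotomy (k1 a) (k1 b) with h | h | h
    · simp [h, Prod.Lex.toLex_lt_toLex]
    · simp [h, Prod.Lex.toLex_lt_toLex]
    · simp [h, not_lt_of_gt h, ne_of_gt h, Prod.Lex.toLex_lt_toLex]
  rw [hb]

-- rank of a type name: the first two components of pvKey
def pvPrio (t : String) : Int :=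
  match PySem.List.index? pvTypeOrder t with
  | some i => (i : Int)
  | none => 5

def pvTname (t : String) : String :=
  match PySem.List.index? pvTypeOrder t with
  | some _ => ""
  | none => t

def PvRankLt (t t' : String) : Prop :=
  pvPrio t < pvPrio t' ∨ (pvPrio t = pvPrio t' ∧ pvTname t < pvTname t')

theorem pvKey_eq (e : List (String × String)) :
    pvKey e = toLex (toLex (pvPrio (pvTypeOf e), pvTname (pvTypeOf e)), pvTitleOf e) := by
  unfold pvKey pvK1 pvPrio pvTname
  cases h : PySem.List.index? pvTypeOrder (pvTypeOf e) <;> simp only [h]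

theorem pvKey_lt_of_rankLt {a b : List (String × String)}
    (h : PvRankLt (pvTypeOf a) (pvTypeOf b)) : pvKey a < pvKey b := by
  rw [pvKey_eq, pvKey_eq, Prod.Lex.toLex_lt_toLex]
  refine Or.inl ?_
  rw [Prod.Lex.toLex_lt_toLex]
  exact h

theorem pvKey_lt_iff_of_type_eq {a b : List (String × String)}
    (h : pvTypeOf a = pvTypeOf b) : (pvKey a < pvKey b) ↔ pvTitleOf a < pvTitleOf b := by
  rw [pvKey_eq, pvKey_eq, h, Prod.Lex.toLex_lt_toLex, Prod.Lex.toLex_lt_toLex]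
  simp

theorem pvRankLt_ne {t t' : String} (h : PvRankLt t t') : t ≠ t' := by
  rintro rfl
  rcases h with h | ⟨_, h⟩ <;> exact lt_irrefl _ h

-- not-in-order types have rank (5, t)
theorem pvPrio_of_not_mem {t : String} (h : t ∉ pvTypeOrder) : pvPrio t = 5 := by
  unfold pvPrio
  cases hi : PySem.List.index? pvTypeOrder t with
  | none => rfl
  | some k =>
    obtain ⟨pre, suf, hx, -, -⟩ := (PySem.List.index?_eq_some_iff _ _ _).mp hi
    exact absurd (hx ▸ List.mem_append_right pre (List.mem_cons_self)) h

theorem pvTname_of_not_mem {t : String} (h : t ∉ pvTypeOrder) : pvTname t = t := by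
  unfold pvTname
  cases hi : PySem.List.index? pvTypeOrder t with
  | none => rfl
  | some k =>
    obtain ⟨pre, suf, hx, -, -⟩ := (PySem.List.index?_eq_some_iff _ _ _).mp hi
    exact absurd (hx ▸ List.mem_append_right pre (List.mem_cons_self)) h

theorem pvPrio_lt_of_mem {t : String} (h : t ∈ pvTypeOrder) : pvPrio t < 5 := by
  fin_cases h <;> decide

-- === generic facts about PySem's stable insertion sort ===

theorem pv_insertBy_append_right {α : Type} (before : α → α → Bool) (x : α) (L R : List α)
    (h : ∀ y ∈ R, before x y = true) :
    PySem.List.insertBy before x (L ++ R) = PySem.List.insertBy before x L ++ R := by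
  induction L with
  | nil =>
    cases R with
    | nil => rfl
    | cons r R' =>
      simp only [List.nil_append, PySem.List.insertBy.eq_2, h r (List.mem_cons_self),
        PySem.List.insertBy.eq_1]
      rfl
  | cons y L' ih =>
    simp only [List.cons_append, PySem.List.insertBy.eq_2]
    by_cases hxy : before x y = true
    · simp [hxy]
    · rw [if_neg hxy, if_neg hxy, ih, List.cons_append]

theorem pv_insertBy_append_left {α : Type} (before : α → α → Bool) (x : α) (L R : List α)
    (h : ∀ y ∈ L, before x y = false) :
    PySem.List.insertBy before x (L ++ R) = L ++ PySem.List.insertBy before x R := by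
  induction L with
  | nil => rfl
  | cons y L' ih =>
    simp only [List.cons_append, PySem.List.insertBy.eq_2, h y (List.mem_cons_self)]
    simp only [Bool.false_eq_true, if_false]
    rw [ih (fun z hz => h z (List.mem_cons_of_mem _ hz))]

theorem pv_insertBy_congr {α : Type} (b1 b2 : α → α → Bool) (x : α) (ys : List α)
    (h : ∀ y ∈ ys, b1 x y = b2 x y) :
    PySem.List.insertBy b1 x ys = PySem.List.insertBy b2 x ys := by
  induction ys with
  | nil => rfl
  | cons y ys' ih =>
    simp only [PySem.List.insertBy.eq_2, h y (List.mem_cons_self)]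
    rw [ih (fun z hz => h z (List.mem_cons_of_mem _ hz))]

theorem pv_sorted_append_singleton {α κ : Type} [LT κ] [DecidableLT κ] (l : List α) (x : α) (key : α → κ) :
    PySem.List.sorted (l ++ [x]) key = PySem.List.insertBy (fun a b => decide (key a < key b)) x (PySem.List.sorted l key) := by
  rw [PySem.List.sorted_eq_foldl_insertBy, PySem.List.sorted_eq_foldl_insertBy, List.foldl_append]
  rfl

-- sorting under key k1 = sorting under key k2 when the two orders agree on the list's elements
theorem pv_sorted_key_congr {α κ₁ κ₂ : Type} [LT κ₁] [DecidableLT κ₁] [LT κ₂] [DecidableLT κ₂]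
    (xs : List α) (k1 : α → κ₁) (k2 : α → κ₂)
    (h : ∀ a ∈ xs, ∀ b ∈ xs, decide (k1 a < k1 b) = decide (k2 a < k2 b)) :
    PySem.List.sorted xs k1 = PySem.List.sorted xs k2 := by
  induction xs using List.reverseRecOn with
  | nil => rfl
  | append_singleton l x ih =>
    rw [pv_sorted_append_singleton, pv_sorted_append_singleton,
      ih (fun a ha b hb => h a (List.mem_append_left _ ha) b (List.mem_append_left _ hb))]
    apply pv_insertBy_congr
    intro y hy
    have hy' : y ∈ l := (PySem.List.mem_sorted _ _ _ _).mp hy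
    exact h x (List.mem_append_right _ (List.mem_cons_self)) y (List.mem_append_left _ hy')

-- a sort splits at a predicate that separates the keys strictly
theorem pv_sorted_split {α κ : Type} [LinearOrder κ] (xs : List α) (key : α → κ) (p : α → Bool)
    (h : ∀ a ∈ xs, ∀ b ∈ xs, p a = true → p b = false → key a < key b) :
    PySem.List.sorted xs key =
      PySem.List.sorted (xs.filter p) key ++ PySem.List.sorted (xs.filter (fun a => !p a)) key := by
  induction xs using List.reverseRecOn with
  | nil => rfl
  | append_singleton l x ih =>
    have h' : ∀ a ∈ l, ∀ b ∈ l, p a = true → p b = false → key a < key b :=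
      fun a ha b hb => h a (List.mem_append_left _ ha) b (List.mem_append_left _ hb)
    rw [pv_sorted_append_singleton, ih h', List.filter_append, List.filter_append]
    by_cases hp : p x = true
    · have hfp : List.filter p [x] = [x] := by simp [hp]
      have hfn : List.filter (fun a => !p a) [x] = [] := by simp [hp]
      rw [hfp, hfn, List.append_nil, pv_sorted_append_singleton]
      apply pv_insertBy_append_right
      intro y hy
      have hy' : y ∈ l.filter (fun a => !p a) := (PySem.List.mem_sorted _ _ _ _).mp hy
      have hyl : y ∈ l := List.mem_of_mem_filter hy'
      have hpy : p y = false := by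
        have := List.of_mem_filter hy'
        simpa using this
      exact decide_eq_true
        (h x (List.mem_append_right _ (List.mem_cons_self)) y (List.mem_append_left _ hyl) hp hpy)
    · have hp' : p x = false := by simpa using hp
      have hfp : List.filter p [x] = [] := by simp [hp']
      have hfn : List.filter (fun a => !p a) [x] = [x] := by simp [hp']
      rw [hfp, hfn, List.append_nil, pv_sorted_append_singleton]
      apply pv_insertBy_append_left
      intro y hy
      have hy' : y ∈ l.filter p := (PySem.List.mem_sorted _ _ _ _).mp hy
      have hyl : y ∈ l := List.mem_of_mem_filter hy'
      have hpy : p y = true := List.of_mem_filter hy'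
      have : key y < key x :=
        h y (List.mem_append_left _ hyl) x (List.mem_append_right _ (List.mem_cons_self)) hpy hp'
      exact decide_eq_false (not_lt_of_gt this)

-- === the peel lemma: a composite-key sort is the concatenation of per-type title sorts ===

theorem pv_peel (ts : List String) (xs : List (List (String × String)))
    (hts : ts.Pairwise (fun t t' => PvRankLt t t'))
    (hcov : ∀ e ∈ xs, pvTypeOf e ∈ ts) :
    PySem.List.sorted xs pvKey false =
      ts.flatMap (fun t => PySem.List.sorted (xs.filter (fun e => pvTypeOf e == t)) (fun e => pvTitleOf e) false) := by
  induction ts generalizing xs with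
  | nil =>
    cases xs with
    | nil => rfl
    | cons e es => exact absurd (hcov e List.mem_cons_self) (List.not_mem_nil)
  | cons t ts' ih =>
    have hpc := List.pairwise_cons.mp hts
    have hsep : ∀ a ∈ xs, ∀ b ∈ xs,
        (fun e => pvTypeOf e == t) a = true → (fun e => pvTypeOf e == t) b = false →
        pvKey a < pvKey b := by
      intro a _ b hb ha hbne
      apply pvKey_lt_of_rankLt
      have hta : pvTypeOf a = t := by simpa using ha
      have htb : pvTypeOf b ∈ ts' := by
        have hbne' : pvTypeOf b ≠ t := by simpa using hbne
        rcases List.mem_cons.mp (hcov b hb) with h | h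
        · exact absurd h hbne'
        · exact h
      rw [hta]
      exact hpc.1 _ htb
    rw [pv_sorted_split xs pvKey (fun e => pvTypeOf e == t) hsep, List.flatMap_cons]
    congr 1
    · apply pv_sorted_key_congr
      intro a ha b hb
      have hta : pvTypeOf a = t := by simpa using List.of_mem_filter ha
      have htb : pvTypeOf b = t := by simpa using List.of_mem_filter hb
      exact decide_eq_decide.mpr (pvKey_lt_iff_of_type_eq (hta.trans htb.symm))
    · have hcov' : ∀ e ∈ xs.filter (fun e => !(pvTypeOf e == t)), pvTypeOf e ∈ ts' := by
        intro e he
        have hne : pvTypeOf e ≠ t := by simpa using List.of_mem_filter he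
        rcases List.mem_cons.mp (hcov e (List.mem_of_mem_filter he)) with h | h
        · exact absurd h hne
        · exact h
      rw [ih _ hpc.2 hcov']

      apply List.flatMap_congr
      intro t' ht'
      have htne : t' ≠ t := by
        have := hpc.1 t' ht'
        exact (pvRankLt_ne this).symm
      congr 1
      rw [List.filter_filter]
      apply List.filter_congr
      intro e _
      by_cases he : pvTypeOf e = t' <;> simp [he, htne]

-- === the bucket of A's dict is a filter of the input ===

theorem pv_grouped_getD (entries : List (List (String × String))) (t : String) :
    (entries.foldl (fun d e => d.modify (pvTypeOf e) [] (fun l => l ++ [e]))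
        (PySem.Dict.empty : PySem.Dict String (List (List (String × String))))).getD t []
      = entries.filter (fun e => pvTypeOf e == t) := by
  have hmap : entries.foldl (fun d e => d.modify (pvTypeOf e) [] (fun l => l ++ [e]))
        (PySem.Dict.empty : PySem.Dict String (List (List (String × String))))
      = (entries.map (fun e => (pvTypeOf e, e))).foldl
          (fun d p => d.modify p.1 [] (fun l => l ++ [p.2])) PySem.Dict.empty := by
    rw [List.foldl_map]
  rw [hmap, PySem.Dict.getD_foldl_modify_append, List.filter_map]
  simp [List.map_map, Function.comp_def]

theorem pv_grouped_keys (entries : List (List (String × String))) :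
    (entries.foldl (fun d e => d.modify (pvTypeOf e) [] (fun l => l ++ [e]))
        (PySem.Dict.empty : PySem.Dict String (List (List (String × String))))).keys
      = PySem.Set.ofList (entries.map pvTypeOf) := by
  rw [PySem.Dict.keys_foldl_modify_key entries pvTypeOf [] (fun _ e l => l ++ [e])]
  rfl

-- remaining types: pairwise rank-increasing and disjoint from pvTypeOrder
theorem pv_remaining_pairwise (ks : PySem.Set String) (hnd : ks.Nodup) :
    (PySem.List.sorted (PySem.Set.diff ks pvTypeOrder) (fun x => x) false).Pairwise (fun t t' => PvRankLt t t') := by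
  have hsub : ∀ x ∈ PySem.List.sorted (PySem.Set.diff ks pvTypeOrder) (fun x => x) false, x ∉ pvTypeOrder := by
    intro x hx
    have : x ∈ PySem.Set.diff ks pvTypeOrder := (PySem.List.mem_sorted _ _ _ _).mp hx
    exact ((PySem.Set.mem_diff _ _ _).mp this).2
  have hle : (PySem.List.sorted (PySem.Set.diff ks pvTypeOrder) (fun x => x) false).Pairwise (fun a b => a ≤ b) := by
    simpa using PySem.List.sorted_pairwise (PySem.Set.diff ks pvTypeOrder) (fun x => x)
  have hnd' : (PySem.List.sorted (PySem.Set.diff ks pvTypeOrder) (fun x => x) false).Nodup := by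
    have hdnd : (PySem.Set.diff ks pvTypeOrder).Nodup := PySem.Set.nodup_diff ks pvTypeOrder hnd
    exact (PySem.List.sorted_perm _ _ _).nodup_iff.mpr hdnd
  have hlt : (PySem.List.sorted (PySem.Set.diff ks pvTypeOrder) (fun x => x) false).Pairwise (fun a b => a < b) := by
    have := hle.and hnd'
    exact this.imp (fun ⟨h1, h2⟩ => lt_of_le_of_ne h1 h2)
  apply List.Pairwise.imp_of_mem (l := _) ?_ hlt
  intro a b ha hb hab
  right
  refine ⟨?_, ?_⟩
  · rw [pvPrio_of_not_mem (hsub a ha), pvPrio_of_not_mem (hsub b hb)]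
  · rw [pvTname_of_not_mem (hsub a ha), pvTname_of_not_mem (hsub b hb)]; exact hab

theorem pv_full_pairwise (ks : PySem.Set String) (hnd : ks.Nodup) :
    (pvTypeOrder ++ PySem.List.sorted (PySem.Set.diff ks pvTypeOrder) (fun x => x) false).Pairwise
      (fun t t' => PvRankLt t t') := by
  rw [List.pairwise_append]
  refine ⟨?_, pv_remaining_pairwise ks hnd, ?_⟩
  · have h : List.Pairwise (fun t t' => pvPrio t < pvPrio t') pvTypeOrder := by decide
    exact h.imp Or.inl
  · intro t ht t' ht'
    have h5 : pvPrio t' = 5 := by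
      have : t' ∉ pvTypeOrder := by
        have : t' ∈ PySem.Set.diff ks pvTypeOrder := (PySem.List.mem_sorted _ _ _ _).mp ht'
        exact ((PySem.Set.mem_diff _ _ _).mp this).2
      exact pvPrio_of_not_mem this
    exact Or.inl (h5 ▸ pvPrio_lt_of_mem ht)

-- ===== VERDICT (by name: the statement is the Claim_ definition above) =====
theorem sort_entries_spec : Claim_equal_sort_entries := by
  intro entries _
  unfold Spec_sort_entries sort_entries sort_entries_alt
  rw [PySem.List.foldl_append_eq_flatMap, List.nil_append,
    pv_sorted2_eq_sorted_toLex entries pvK1 (fun e => pvTitleOf e)]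
  have hk : (fun a => toLex (pvK1 a, pvTitleOf a)) = pvKey := rfl
  rw [hk]
  have hbucket : ∀ t, (entries.foldl (fun d e => d.modify (pvTypeOf e) [] (fun l => l ++ [e]))
      (PySem.Dict.empty : PySem.Dict String (List (List (String × String))))).getD t []
      = entries.filter (fun e => pvTypeOf e == t) := pv_grouped_getD entries
  simp only [hbucket, pv_grouped_keys]
  rw [← pv_peel]
  · exact pv_full_pairwise _ (PySem.Set.nodup_ofList _)
  · intro e he
    by_cases hmem : pvTypeOf e ∈ pvTypeOrder
    · exact List.mem_append_left _ hmem
    · apply List.mem_append_right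
      rw [PySem.List.mem_sorted, PySem.Set.mem_diff]
      refine ⟨?_, hmem⟩
      exact (PySem.Set.mem_ofList _ _).mpr
        ((PySem.Set.mem_ofList _ _).mpr (List.mem_map_of_mem he))
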